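-- pv_equiv track=rewrite | github.com/evangoldrick/octoviewer-light | GCodeParser.py | getLayerByComments
-- ===== SOURCE A (Python) =====
-- def getLayerByComments(gCodeWithCounts: list):
--     layerCount = 0
--     layers = list()
--
--     for line in gCodeWithCounts:
--         if line[0].startswith(";Layer:"):
--             layerCount = int(line[0].split(":")[1])
--
--         while len(layers) <= layerCount:
--             layers.append(list())
--         layers[layerCount].append(line)
--
--     return layers
-- ===== SOURCE B (Python) =====
-- def getLayerByComments(gCodeWithCounts: list):
--     def layerOf(head, prev):
--         return int(head.split(":")[1]) if head.startswith(";Layer:") else prev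
--     indices = []
--     prev = 0
--     for line in gCodeWithCounts:
--         prev = layerOf(line[0], prev)
--         indices.append(prev)
--     top = max(indices, default=-1)
--     return [[line for line, j in zip(gCodeWithCounts, indices) if j == i]
--             for i in range(top + 1)]
-- ===== Notes on version B (the rewrite author's own statement) =====
-- stated objective: alternative
-- what changed: B works in two staged passes: it first annotates every line with its layer index (a prefix scan producing a parallel index list), then reconstructs each layer by filtering the annotated list per index in range(max+1), instead of A's single pass that grows and pads a list of buckets in place.
import Mathlib
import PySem

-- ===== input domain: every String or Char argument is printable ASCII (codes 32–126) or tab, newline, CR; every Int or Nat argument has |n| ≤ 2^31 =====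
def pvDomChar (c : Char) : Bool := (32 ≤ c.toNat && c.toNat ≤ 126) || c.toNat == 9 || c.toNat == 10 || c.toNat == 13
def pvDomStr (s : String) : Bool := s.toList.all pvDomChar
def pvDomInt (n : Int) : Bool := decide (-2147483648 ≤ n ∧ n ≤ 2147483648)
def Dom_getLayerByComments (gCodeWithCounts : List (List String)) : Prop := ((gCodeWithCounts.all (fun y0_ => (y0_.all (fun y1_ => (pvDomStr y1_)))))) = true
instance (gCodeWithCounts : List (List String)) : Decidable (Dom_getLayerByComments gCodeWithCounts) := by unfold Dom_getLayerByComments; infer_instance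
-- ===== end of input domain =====

-- B is a two-stage alternative: it first annotates each line with its layer index (a prefix
-- scan into a parallel index list), then rebuilds each layer by filtering that annotated list
-- per index — instead of A's single pass that pads and grows a bucket list in place.


-- ===== PORT A =====
-- layerCount/layers fold; `line[0]` is `pyGet? line 0` (Pre_ guarantees it is some),
-- the `while len(layers) <= layerCount: layers.append([])` loop appends exactly
-- (layerCount + 1 - len).toNat empty layers, and `layers[layerCount].append(line)` is
-- `List.modify` at layerCount.toNat (Pre_ guarantees layerCount ≥ 0, so no negative wraparound).
def stepA (st : Int × List (List (List String))) (line : List String) :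
    Int × List (List (List String)) :=
  let first := (PySem.List.pyGet? line 0).getD ""
  let lc : Int :=
    if PySem.Str.startswith first ";Layer:" then
      ((PySem.Int.ofStr? (((PySem.Str.split? first ":").getD []).getD 1 ""))).getD 0
    else st.1
  let layers := st.2 ++ List.replicate (lc + 1 - st.2.length).toNat []
  (lc, layers.modify lc.toNat (· ++ [line]))

def getLayerByComments (gCodeWithCounts : List (List String)) : List (List (List String)) :=
  (gCodeWithCounts.foldl stepA (0, [])).2

-- ===== PORT B =====
-- Source B's `layerOf(head, prev)` helper
def layerOfB (head : String) (prev : Int) : Int :=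
  if PySem.Str.startswith head ";Layer:" then
    ((PySem.Int.ofStr? (((PySem.Str.split? head ":").getD []).getD 1 ""))).getD 0
  else prev

-- the index-annotation loop: `indices` as a function of the running `prev`
def annB : Int → List (List String) → List Int
  | _, [] => []
  | prev, line :: rest =>
    let cur := layerOfB ((PySem.List.pyGet? line 0).getD "") prev
    cur :: annB cur rest

-- `max(indices, default=-1)` is max? ∘ getD (-1); the outer comprehension is a map over
-- range(top+1), the inner one a filter of zip(gCodeWithCounts, indices) then a map to the line.
def getLayerByComments_alt (gCodeWithCounts : List (List String)) : List (List (List String)) :=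
  let indices := annB 0 gCodeWithCounts
  let top := (PySem.List.max? indices (fun y => y)).getD (-1)
  (PySem.List.pyRange 0 (top + 1) 1).map
    (fun i => ((gCodeWithCounts.zip indices).filter (fun p => p.2 == i)).map Prod.fst)

-- ===== PRECONDITION & SPEC =====
-- Pre_ excludes inputs on which A raises (a line that is an empty list → IndexError on line[0];
-- a ";Layer:" comment whose value is not an int literal → ValueError) and ";Layer:" comments with a
-- NEGATIVE value, on which A either raises IndexError or appends to the last existing layer through
-- accidental negative-index wraparound — a defensible-corner artefact no caller would specify.
def Pre_getLayerByComments (gCodeWithCounts : List (List String)) : Prop :=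
  ∀ line ∈ gCodeWithCounts, line ≠ [] ∧
    (PySem.Str.startswith (line.headD "") ";Layer:" = true →
      (PySem.Int.ofStr? (((PySem.Str.split? (line.headD "") ":").getD []).getD 1 "")).isSome = true ∧
      0 ≤ (PySem.Int.ofStr? (((PySem.Str.split? (line.headD "") ":").getD []).getD 1 "")).getD 0)
instance (gCodeWithCounts : List (List String)) : Decidable (Pre_getLayerByComments gCodeWithCounts) := by
  unfold Pre_getLayerByComments; infer_instance

def pvWitness_getLayerByComments : List (List String) :=
  [["G28"], [";Layer:0", "c0"], ["G1 X1"], [";Layer:2"], ["G1 X2"]]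

def Spec_getLayerByComments (gCodeWithCounts : List (List String)) (out : List (List (List String))) : Prop := out = getLayerByComments_alt gCodeWithCounts
instance (gCodeWithCounts : List (List String)) (out : List (List (List String))) : Decidable (Spec_getLayerByComments gCodeWithCounts out) := by unfold Spec_getLayerByComments; infer_instance

-- ===== CLAIM (what is proved, stated in full; the proofs are below) =====
def Claim_equal_getLayerByComments : Prop := ∀ (gCodeWithCounts : List (List String)), Dom_getLayerByComments gCodeWithCounts → Pre_getLayerByComments gCodeWithCounts → Spec_getLayerByComments gCodeWithCounts (getLayerByComments gCodeWithCounts)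

-- ===== LEMMAS AND PROOFS =====

-- per-line form of Pre_
def PreLine (line : List String) : Prop :=
  line ≠ [] ∧
    (PySem.Str.startswith (line.headD "") ";Layer:" = true →
      (PySem.Int.ofStr? (((PySem.Str.split? (line.headD "") ":").getD []).getD 1 "")).isSome = true ∧
      0 ≤ (PySem.Int.ofStr? (((PySem.Str.split? (line.headD "") ":").getD []).getD 1 "")).getD 0)

def maxI (idx : List Int) : Int := idx.foldl max (-1)

def bucket (g : List (List String)) (idx : List Int) (i : Int) : List (List String) :=
  ((g.zip idx).filter (fun p => p.2 == i)).map Prod.fst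

def buildOf (g : List (List String)) : List (List (List String)) :=
  (List.range (maxI (annB 0 g) + 1).toNat).map (fun k => bucket g (annB 0 g) (Int.ofNat k))

def lastFrom (p : Int) (g : List (List String)) : Int := (annB p g).getLastD p

theorem length_annB (g : List (List String)) : ∀ p, (annB p g).length = g.length := by
  induction g with
  | nil => intro p; rfl
  | cons l t ih => intro p; simp [annB, ih]

theorem headD_eq_pyGet (x : String) (xs : List String) :
    (PySem.List.pyGet? (x :: xs) (0 : Int)).getD "" = x := by
  simp [PySem.List.pyGet?, PySem.List.pyIdx?]

theorem layerOfB_nonneg (l : List String) (p : Int) (hl : PreLine l) (hp : 0 ≤ p) :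
    0 ≤ layerOfB ((PySem.List.pyGet? l 0).getD "") p := by
  obtain ⟨x, xs, rfl⟩ : ∃ x xs, l = x :: xs := by
    cases l with
    | nil => exact absurd rfl hl.1
    | cons x xs => exact ⟨x, xs, rfl⟩
  rw [headD_eq_pyGet]
  unfold layerOfB
  split_ifs with hsw
  · exact (hl.2 hsw).2
  · exact hp

theorem annB_nonneg (g : List (List String)) : ∀ p, (∀ l ∈ g, PreLine l) → 0 ≤ p →
    ∀ a ∈ annB p g, 0 ≤ a := by
  induction g with
  | nil => intro p _ _ a ha; simp [annB] at ha
  | cons l t ih =>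
    intro p hpre hp a ha
    have hc : 0 ≤ layerOfB ((PySem.List.pyGet? l 0).getD "") p :=
      layerOfB_nonneg l p (hpre l (by simp)) hp
    simp only [annB, List.mem_cons] at ha
    rcases ha with rfl | ha
    · exact hc
    · exact ih _ (fun x hx => hpre x (by simp [hx])) hc a ha

theorem getLastD_append_singleton (l : List Int) (c d : Int) : (l ++ [c]).getLastD d = c := by
  induction l generalizing d with
  | nil => rfl
  | cons a t ih => rw [List.cons_append, List.getLastD_cons, ih]

theorem getLastD_mem_or (l : List Int) (d : Int) : l.getLastD d = d ∨ l.getLastD d ∈ l := by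
  induction l generalizing d with
  | nil => exact Or.inl rfl
  | cons a t ih =>
    right
    rw [List.getLastD_cons]
    rcases ih a with h | h
    · rw [h]; exact List.mem_cons_self
    · exact List.mem_cons_of_mem a h

theorem lastFrom_nonneg (g : List (List String)) (p : Int)
    (hpre : ∀ l ∈ g, PreLine l) (hp : 0 ≤ p) : 0 ≤ lastFrom p g := by
  unfold lastFrom
  rcases getLastD_mem_or (annB p g) p with h | h
  · omega
  · exact annB_nonneg g p hpre hp _ h

theorem annB_append_singleton (g : List (List String)) (l : List String) : ∀ p,
    annB p (g ++ [l]) = annB p g ++ [layerOfB ((PySem.List.pyGet? l 0).getD "") (lastFrom p g)] := by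
  induction g with
  | nil => intro p; simp [annB, lastFrom]
  | cons x t ih =>
    intro p
    simp only [List.cons_append, annB, ih, lastFrom, List.getLastD_cons]

theorem maxI_mem_le (idx : List Int) : ∀ a ∈ idx, a ≤ maxI idx :=
  (PySem.List.le_foldl_max idx (-1)).2

theorem bucket_big (g : List (List String)) (idx : List Int) (i : Int)
    (hi : maxI idx < i) : bucket g idx i = [] := by
  unfold bucket
  rw [List.filter_eq_nil_iff.2, List.map_nil]
  intro p hp
  have h2 : p.2 ∈ idx := (List.of_mem_zip (a := p.1) (b := p.2) hp).2
  have := maxI_mem_le idx p.2 h2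
  simp only [beq_iff_eq]
  omega

theorem bucket_append (g : List (List String)) (idx : List Int)
    (hlen : g.length = idx.length) (l : List String) (c i : Int) :
    bucket (g ++ [l]) (idx ++ [c]) i
      = bucket g idx i ++ (if c == i then [l] else []) := by
  unfold bucket
  rw [List.zip_append hlen, List.filter_append, List.map_append]
  congr 1
  by_cases h : c == i <;> simp_all

theorem buildOf_length (g : List (List String)) :
    (buildOf g).length = (maxI (annB 0 g) + 1).toNat := by
  simp [buildOf]

theorem buildOf_getElem (g : List (List String)) (j : Nat) (h : j < (buildOf g).length) :
    (buildOf g)[j] = bucket g (annB 0 g) (j : Int) := by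
  unfold buildOf at h ⊢
  rw [List.getElem_map, List.getElem_range]
  rfl

-- the main step: A's body maps (lastFrom 0 done, buildOf done) to the state for done ++ [l]
theorem stepA_char (done : List (List String)) (l : List String)
    (hl : PreLine l) (hdone : ∀ m ∈ done, PreLine m) :
    stepA (lastFrom 0 done, buildOf done) l = (lastFrom 0 (done ++ [l]), buildOf (done ++ [l])) := by
  set idx := annB 0 done with hidx
  set c := layerOfB ((PySem.List.pyGet? l 0).getD "") (lastFrom 0 done) with hc
  have hann : annB 0 (done ++ [l]) = idx ++ [c] := annB_append_singleton done l 0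
  have hlast : lastFrom 0 (done ++ [l]) = c := by
    unfold lastFrom
    rw [hann, getLastD_append_singleton]
  have hc0 : 0 ≤ c := layerOfB_nonneg l _ hl (lastFrom_nonneg done 0 hdone le_rfl)
  have hM : maxI (idx ++ [c]) = max (maxI idx) c := by
    unfold maxI; rw [List.foldl_append]; rfl
  set M := maxI idx with hMdef
  have hMge : -1 ≤ M := (PySem.List.le_foldl_max idx (-1)).1
  set m := (M + 1).toNat with hm
  have hblen : (buildOf done).length = m := by rw [buildOf_length, ← hidx, ← hMdef, hm]
  set padded := buildOf done ++ List.replicate (c + 1 - (m : Int)).toNat [] with hpadded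
  set m' := (max M c + 1).toNat with hm'
  have hplen : padded.length = m' := by
    simp [hpadded, hblen, hm', hm]; omega
  have hpad : ∀ j (hj : j < m'), padded[j]'(by rw [hplen]; exact hj) = bucket done idx (j : Int) := by
    intro j hj
    by_cases hjm : j < m
    · rw [List.getElem_append_left (by rw [hblen]; exact hjm)]
      rw [buildOf_getElem done j (by rw [hblen]; exact hjm), ← hidx]
    · rw [List.getElem_append_right (by rw [hblen]; omega)]
      rw [bucket_big done idx (j : Int) (by rw [← hMdef]; omega)]
      simp
  have hstep : stepA (lastFrom 0 done, buildOf done) l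
      = (c, padded.modify c.toNat (· ++ [l])) := by
    simp only [stepA, layerOfB] at hc ⊢
    rw [← hc, hpadded, hblen]
  rw [hstep, hlast]
  congr 1
  -- list part
  have hLlen : (padded.modify c.toNat (· ++ [l])).length = m' := by
    simp [List.length_modify, hplen]
  have hRlen : (buildOf (done ++ [l])).length = m' := by
    rw [buildOf_length, hann, hM]
  apply List.ext_getElem (by rw [hLlen, hRlen])
  intro j h1 h2
  have hj : j < m' := by rwa [hLlen] at h1
  rw [List.getElem_modify]
  have hRj : (buildOf (done ++ [l]))[j]'h2
      = bucket done idx (j : Int) ++ (if c == (j : Int) then [l] else []) := by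
    rw [buildOf_getElem (done ++ [l]) j h2, hann,
      bucket_append done idx (by rw [hidx, length_annB]) l c (j : Int)]
  rw [hRj]
  by_cases hjc : c.toNat = j
  · rw [if_pos hjc, hpad j hj]
    have hbe : (c == (j : Int)) = true := by simp; omega
    rw [hbe]
    simp
  · rw [if_neg hjc, hpad j hj]
    have hbe : (c == (j : Int)) = false := by simp; omega
    rw [hbe]
    simp

theorem foldA_char (g : List (List String)) : ∀ done, (∀ m ∈ done ++ g, PreLine m) →
    g.foldl stepA (lastFrom 0 done, buildOf done)
      = (lastFrom 0 (done ++ g), buildOf (done ++ g)) := by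
  induction g with
  | nil => intro done _; simp
  | cons l t ih =>
    intro done hpre
    have h1 : PreLine l := hpre l (by simp)
    have h2 : ∀ m ∈ done, PreLine m := fun m hm => hpre m (by simp [hm])
    rw [List.foldl_cons, stepA_char done l h1 h2]
    have := ih (done ++ [l]) (by intro m hm; apply hpre; simpa using hm)
    simpa using this

theorem final_eq (g : List (List String)) (hpre : Pre_getLayerByComments g) :
    getLayerByComments g = getLayerByComments_alt g := by
  have hpre' : ∀ m ∈ g, PreLine m := hpre
  unfold getLayerByComments getLayerByComments_alt
  rw [show ((0 : Int), ([] : List (List (List String)))) = (lastFrom 0 [], buildOf []) from rfl,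
    foldA_char g [] (by simpa using hpre')]
  simp only [List.nil_append]
  have htop : (PySem.List.max? (annB 0 g) (fun y => y)).getD (-1) = maxI (annB 0 g) := by
    cases h : annB 0 g with
    | nil => rfl
    | cons a t =>
      rw [PySem.List.max?_id_cons, Option.getD_some]
      have ha : 0 ≤ a := annB_nonneg g 0 hpre' le_rfl a (by rw [h]; simp)
      unfold maxI
      rw [List.foldl_cons]
      congr 1
      omega
  rw [htop]
  have hcast : maxI (annB 0 g) + 1 = (((maxI (annB 0 g) + 1).toNat : Nat) : Int) := by
    have := (PySem.List.le_foldl_max (annB 0 g) (-1)).1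
    unfold maxI at *
    omega
  rw [hcast, PySem.List.pyRange_zero_natCast, List.map_map]
  unfold buildOf bucket
  rfl

-- ===== VERDICT (by name: the statement is the Claim_ definition above) =====
theorem getLayerByComments_spec : Claim_equal_getLayerByComments := by
  intro g _ hpre
  unfold Spec_getLayerByComments
  exact final_eq g hpre
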